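-- pv_equiv track=rewrite | github.com/Altyor/P1900_SIN_OTAU | OTA_FTP_App/src/domain/config_ini.py | remove_section
-- ===== SOURCE A (Python) =====
-- from typing import Dict, List, Optional, Set, Tuple
--
-- def _split_eol(line: str) -> Tuple[str, str]:
--     for suffix in ("\r\n", "\n", "\r"):
--         if line.endswith(suffix):
--             return line[: -len(suffix)], suffix
--     return line, ""
--
-- def remove_section(text: str, section: str) -> str:
--     """Strip `[section]` and all its key=value lines until the next header / EOF."""
--     out: List[str] = []
--     in_target = False
--     for raw_line in text.splitlines(keepends=True):
--         body, _ = _split_eol(raw_line)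
--         s = body.strip()
--         if s.startswith("[") and s.endswith("]"):
--             in_target = (s[1:-1].strip() == section)
--             if in_target:
--                 continue
--         if in_target:
--             continue
--         out.append(raw_line)
--     return "".join(out)
-- ===== SOURCE B (Python) =====
-- from typing import List, Optional, Tuple
--
-- def _split_eol(line: str) -> Tuple[str, str]:
--     for suffix in ("\r\n", "\n", "\r"):
--         if line.endswith(suffix):
--             return line[: -len(suffix)], suffix
--     return line, ""
--
-- def _header_name(raw_line: str) -> Optional[str]:
--     body, _ = _split_eol(raw_line)
--     s = body.strip()
--     if s.startswith("[") and s.endswith("]"):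
--         return s[1:-1].strip()
--     return None
--
-- def remove_section(text: str, section: str) -> str:
--     """Group lines into section segments, then drop whole segments whose header matches."""
--     segments: List[List[str]] = []
--     current: List[str] = []
--     for line in text.splitlines(keepends=True):
--         if _header_name(line) is not None:
--             segments.append(current)
--             current = [line]
--         else:
--             current.append(line)
--     segments.append(current)
--     out: List[str] = []
--     for seg in segments:
--         if not seg or _header_name(seg[0]) != section:
--             out.extend(seg)
--     return "".join(out)
-- ===== Notes on version B (the rewrite author's own statement) =====
-- stated objective: alternative
-- what changed: Replaces the per-line in_target flag scan by a two-phase pass: group the kept-EOL lines into a preamble plus per-header segments, then filter out whole segments whose header name equals section and join the survivors.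
import Mathlib
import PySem

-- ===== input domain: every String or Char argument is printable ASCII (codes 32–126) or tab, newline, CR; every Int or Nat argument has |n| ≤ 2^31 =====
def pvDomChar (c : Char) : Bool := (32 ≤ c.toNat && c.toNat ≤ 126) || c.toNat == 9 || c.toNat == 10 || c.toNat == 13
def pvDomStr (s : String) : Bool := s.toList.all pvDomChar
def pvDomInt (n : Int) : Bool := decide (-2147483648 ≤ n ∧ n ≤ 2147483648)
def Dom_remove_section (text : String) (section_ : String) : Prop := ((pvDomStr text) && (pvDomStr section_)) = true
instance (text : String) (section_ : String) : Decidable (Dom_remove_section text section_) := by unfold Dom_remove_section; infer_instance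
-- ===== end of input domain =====

-- B regroups A's flag-scan into segment building + segment filtering (same cost, different decomposition).

-- shared helper: text.splitlines(keepends=True); exact on Dom (line breaks there are only \n, \r, \r\n)
def pvLinesKE (acc : List Char) : List Char → List (List Char)
  | [] => if acc = [] then [] else [acc.reverse]
  | '\r' :: '\n' :: rest => (acc.reverse ++ ['\r', '\n']) :: pvLinesKE [] rest
  | '\n' :: rest => (acc.reverse ++ ['\n']) :: pvLinesKE [] rest
  | '\r' :: rest => (acc.reverse ++ ['\r']) :: pvLinesKE [] rest
  | c :: rest => pvLinesKE (c :: acc) rest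

-- shared helper: _split_eol (a module helper both A and B use)
def pvSplitEOL (line : List Char) : List Char × List Char :=
  if PySem.Chars.endswith line ['\r', '\n'] then (PySem.Chars.slice line none (some (-2)), ['\r', '\n'])
  else if PySem.Chars.endswith line ['\n'] then (PySem.Chars.slice line none (some (-1)), ['\n'])
  else if PySem.Chars.endswith line ['\r'] then (PySem.Chars.slice line none (some (-1)), ['\r'])
  else (line, [])

-- ===== PORT A =====
def remove_section (text : String) (section_ : String) : String :=
  let st := (pvLinesKE [] text.toList).foldl
    (fun (st : List (List Char) × Bool) raw =>
      let body := (pvSplitEOL raw).1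
      let s := PySem.Chars.strip body
      if PySem.Chars.startswith s ['['] && PySem.Chars.endswith s [']'] then
        if PySem.Chars.strip (PySem.Chars.slice s (some 1) (some (-1))) = section_.toList
        then (st.1, true)
        else (st.1 ++ [raw], false)
      else if st.2 then st
      else (st.1 ++ [raw], st.2))
    ([], false)
  String.ofList (PySem.Chars.join [] st.1)

-- ===== PORT B =====
def pvHeaderName? (raw : List Char) : Option (List Char) :=
  let s := PySem.Chars.strip (pvSplitEOL raw).1
  if PySem.Chars.startswith s ['['] && PySem.Chars.endswith s [']'] then
    some (PySem.Chars.strip (PySem.Chars.slice s (some 1) (some (-1))))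
  else none

def pvSegments (lines : List (List Char)) : List (List (List Char)) :=
  let st := lines.foldl
    (fun (st : List (List (List Char)) × List (List Char)) line =>
      if (pvHeaderName? line).isSome then (st.1 ++ [st.2], [line])
      else (st.1, st.2 ++ [line]))
    ([], [])
  st.1 ++ [st.2]

def remove_section_alt (text : String) (section_ : String) : String :=
  let segs := pvSegments (pvLinesKE [] text.toList)
  let out := (segs.filter (fun seg =>
      match seg with
      | [] => true
      | l :: _ => pvHeaderName? l != some section_.toList)).flatten
  String.ofList (PySem.Chars.join [] out)

-- ===== PRECONDITION & SPEC =====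
def Spec_remove_section (text : String) (section_ : String) (out : String) : Prop := out = remove_section_alt text section_
instance (text : String) (section_ : String) (out : String) : Decidable (Spec_remove_section text section_ out) := by unfold Spec_remove_section; infer_instance

-- ===== CLAIM (what is proved, stated in full; the proofs are below) =====
def Claim_equal_remove_section : Prop := ∀ (text : String) (section_ : String), Dom_remove_section text section_ → Spec_remove_section text section_ (remove_section text section_)

-- ===== LEMMAS AND PROOFS =====

-- named forms of the two fold bodies (definitionally equal to the lambdas in the ports)
def pvStepA (sec : List Char) (st : List (List Char) × Bool) (raw : List Char) :
    List (List Char) × Bool :=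
  let body := (pvSplitEOL raw).1
  let s := PySem.Chars.strip body
  if PySem.Chars.startswith s ['['] && PySem.Chars.endswith s [']'] then
    if PySem.Chars.strip (PySem.Chars.slice s (some 1) (some (-1))) = sec
    then (st.1, true)
    else (st.1 ++ [raw], false)
  else if st.2 then st
  else (st.1 ++ [raw], st.2)

def pvStepB (st : List (List (List Char))) (cur : List (List Char)) (line : List Char) :
    List (List (List Char)) × List (List Char) :=
  if (pvHeaderName? line).isSome then (st ++ [cur], [line]) else (st, cur ++ [line])

-- the kept raw lines, as a recursion over the line list (flag = inside the target section)
def pvKept (sec : List Char) (flag : Bool) : List (List Char) → List (List Char)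
  | [] => []
  | l :: rest =>
    match pvHeaderName? l with
    | some name => if name = sec then pvKept sec true rest else l :: pvKept sec false rest
    | none => if flag then pvKept sec flag rest else l :: pvKept sec flag rest

-- recursive view of B's segment-building fold
def pvSegR (cur : List (List Char)) : List (List Char) → List (List (List Char))
  | [] => [cur]
  | l :: rest =>
    if (pvHeaderName? l).isSome then cur :: pvSegR [l] rest
    else pvSegR (cur ++ [l]) rest

def pvKeepP (sec : List Char) (seg : List (List Char)) : Bool :=
  match seg with
  | [] => true
  | l :: _ => pvHeaderName? l != some sec

theorem segments_eq_segR (lines : List (List Char)) (segs : List (List (List Char)))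
    (cur : List (List Char)) :
    (lines.foldl (fun st line => pvStepB st.1 st.2 line) (segs, cur)).1
    ++ [(lines.foldl (fun st line => pvStepB st.1 st.2 line) (segs, cur)).2]
    = segs ++ pvSegR cur lines := by
  induction lines generalizing segs cur with
  | nil => simp [pvSegR]
  | cons l rest ih =>
    rw [List.foldl_cons]
    by_cases h : (pvHeaderName? l).isSome
    · have hstep : pvStepB segs cur l = (segs ++ [cur], [l]) := by simp [pvStepB, h]
      rw [hstep, ih]
      simp [pvSegR, h]
    · have hn : pvHeaderName? l = none := Option.not_isSome_iff_eq_none.mp h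
      have hstep : pvStepB segs cur l = (segs, cur ++ [l]) := by simp [pvStepB, h]
      rw [hstep, ih]
      simp [pvSegR, hn]

theorem filter_segR_eq_kept (sec : List Char) (lines : List (List Char))
    (cur : List (List Char)) :
    ((pvSegR cur lines).filter (pvKeepP sec)).flatten
      = (if pvKeepP sec cur then cur else []) ++ pvKept sec (!pvKeepP sec cur) lines := by
  induction lines generalizing cur with
  | nil =>
    simp only [pvSegR, pvKept, List.filter]
    cases hc : pvKeepP sec cur <;> simp
  | cons l rest ih =>
    by_cases h : (pvHeaderName? l).isSome
    · obtain ⟨name, hn⟩ := Option.isSome_iff_exists.mp h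
      have hseg : pvSegR cur (l :: rest) = cur :: pvSegR [l] rest := by simp [pvSegR, hn]
      have h1 := ih [l]
      by_cases he : name = sec
      · have hk : pvKeepP sec [l] = false := by simp [pvKeepP, hn, he]
        rw [hk] at h1
        rw [hseg, List.filter_cons]
        cases hc : pvKeepP sec cur <;> simp [hc, h1, pvKept, hn, he]
      · have hk : pvKeepP sec [l] = true := by simp [pvKeepP, hn, he]
        rw [hk] at h1
        rw [hseg, List.filter_cons]
        cases hc : pvKeepP sec cur <;> simp [hc, h1, pvKept, hn, he]
    · have hn : pvHeaderName? l = none := Option.not_isSome_iff_eq_none.mp h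
      have hk : pvKeepP sec (cur ++ [l]) = pvKeepP sec cur := by
        cases cur with
        | nil => simp [pvKeepP, hn]
        | cons a t => simp [pvKeepP]
      have hseg : pvSegR cur (l :: rest) = pvSegR (cur ++ [l]) rest := by simp [pvSegR, hn]
      have hkept : ∀ b : Bool, pvKept sec b (l :: rest)
          = if b then pvKept sec b rest else l :: pvKept sec b rest := by
        intro b; cases b <;> simp [pvKept, hn]
      rw [hseg, ih (cur ++ [l]), hk, hkept]
      cases hc : pvKeepP sec cur <;> simp [hc]

theorem foldA_eq_kept (sec : List Char) (lines : List (List Char))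
    (out : List (List Char)) (flag : Bool) :
    (lines.foldl (pvStepA sec) (out, flag)).1 = out ++ pvKept sec flag lines := by
  induction lines generalizing out flag with
  | nil => simp [pvKept]
  | cons l rest ih =>
    rw [List.foldl_cons]
    by_cases h : (PySem.Chars.startswith (PySem.Chars.strip (pvSplitEOL l).1) ['['] &&
        PySem.Chars.endswith (PySem.Chars.strip (pvSplitEOL l).1) [']']) = true
    · have hh : pvHeaderName? l =
          some (PySem.Chars.strip (PySem.Chars.slice (PySem.Chars.strip (pvSplitEOL l).1) (some 1) (some (-1)))) := by
        simp only [pvHeaderName?]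
        rw [if_pos h]
      by_cases he : PySem.Chars.strip (PySem.Chars.slice (PySem.Chars.strip (pvSplitEOL l).1) (some 1) (some (-1))) = sec
      · have hstep : pvStepA sec (out, flag) l = (out, true) := by
          simp only [pvStepA]
          rw [if_pos h, if_pos he]
        have hkept : pvKept sec flag (l :: rest) = pvKept sec true rest := by
          simp only [pvKept, hh]
          rw [if_pos he]
        rw [hstep, ih, hkept]
      · have hstep : pvStepA sec (out, flag) l = (out ++ [l], false) := by
          simp only [pvStepA]
          rw [if_pos h, if_neg he]
        have hkept : pvKept sec flag (l :: rest) = l :: pvKept sec false rest := by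
          simp only [pvKept, hh]
          rw [if_neg he]
        rw [hstep, ih, hkept]
        simp
    · have hh : pvHeaderName? l = none := by
        simp only [pvHeaderName?]
        rw [if_neg h]
      have hstep : pvStepA sec (out, flag) l = if flag then (out, flag) else (out ++ [l], flag) := by
        simp only [pvStepA]
        rw [if_neg h]
      cases flag with
      | true =>
        rw [if_pos rfl] at hstep
        rw [hstep, ih]
        simp [pvKept, hh]
      | false =>
        rw [if_neg (by simp : ¬ (false = true))] at hstep
        rw [hstep, ih]
        simp [pvKept, hh]

-- ===== VERDICT (by name: the statement is the Claim_ definition above) =====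
theorem remove_section_spec : Claim_equal_remove_section := by
  intro text section_ _
  have hA : remove_section text section_
      = String.ofList (PySem.Chars.join []
          ((pvLinesKE [] text.toList).foldl (pvStepA section_.toList) ([], false)).1) := rfl
  have hB : remove_section_alt text section_
      = String.ofList (PySem.Chars.join []
          ((((pvLinesKE [] text.toList).foldl (fun st line => pvStepB st.1 st.2 line) ([], [])).1
            ++ [((pvLinesKE [] text.toList).foldl (fun st line => pvStepB st.1 st.2 line) ([], [])).2]).filter
              (pvKeepP section_.toList)).flatten) := rfl
  unfold Spec_remove_section
  rw [hA, hB, foldA_eq_kept, segments_eq_segR]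
  simp only [List.nil_append]
  rw [filter_segR_eq_kept]
  simp [pvKeepP]
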